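-- pv_equiv track=rewrite | github.com/JavRedstone/esc180-labs | lab04/lab04_2.py | make_guesses
-- ===== SOURCE A (Python) =====
-- def count_white_hats(hats):
--     '''Return the number of white hats in the list hats.'''
--     count = 0
--     for hat in hats:
--         count += hat == 'W'
--     return count
--
-- def make_guesses(hats):
--     '''Return a list of guesses, one for each hat in hats.
--     The guesses should be ’W’ or ’B’.'''
--
--     # For the student hats[i], make a guess based on the number
--     # of white hats that they see
--     # You can use count_white_hats() to help you figure out the
--     # number of white hats that a student sees
--
--     guesses = []
--     for i in range(len(hats)):
--         num_hats = count_white_hats(hats[0:i] + hats[i+1: len(hats)])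
--         choice = 'W'
--         if num_hats % 2 == 0:
--             choice = 'B'
--         guesses.append(choice)
--     return guesses
-- ===== SOURCE B (Python) =====
-- def make_guesses(hats):
--     '''Return a list of guesses, one for each hat in hats.
--     The guesses should be 'W' or 'B'.'''
--     total = 0
--     for h in hats:
--         total += h == 'W'
--     return ['B' if (total - (h == 'W')) % 2 == 0 else 'W' for h in hats]
-- ===== Notes on version B (the rewrite author's own statement) =====
-- stated objective: faster
-- what changed: Count all white hats once, then derive each guess from total minus the hat's own contribution, replacing the per-index slice-and-recount loop.
import Mathlib
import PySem

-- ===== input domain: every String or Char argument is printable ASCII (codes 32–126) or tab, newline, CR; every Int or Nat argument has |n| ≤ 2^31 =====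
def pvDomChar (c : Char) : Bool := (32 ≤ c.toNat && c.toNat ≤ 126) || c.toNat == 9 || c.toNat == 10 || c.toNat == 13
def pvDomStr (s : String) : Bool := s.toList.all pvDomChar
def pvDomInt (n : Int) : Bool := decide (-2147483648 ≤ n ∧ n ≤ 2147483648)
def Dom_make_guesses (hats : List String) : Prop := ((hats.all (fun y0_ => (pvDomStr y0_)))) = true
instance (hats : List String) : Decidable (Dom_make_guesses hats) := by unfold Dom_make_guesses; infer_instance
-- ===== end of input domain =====

-- B counts white hats once and derives each guess from the total minus the hat's own contribution (O(n)),
-- instead of A's per-index slice-and-recount (O(n^2)). Equivalence of return values is proved on all inputs.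

-- ===== PORT A =====
def count_white_hats (hats : List String) : Int :=
  hats.foldl (fun count hat => count + (if hat == "W" then 1 else 0)) 0

def make_guesses (hats : List String) : List String :=
  (PySem.List.pyRange 0 (PySem.List.len hats) 1).foldl
    (fun guesses i =>
      let num_hats := count_white_hats
        (PySem.List.slice hats (some 0) (some i) ++
         PySem.List.slice hats (some (i + 1)) (some (PySem.List.len hats)))
      let choice := if PySem.Int.mod num_hats 2 == 0 then "B" else "W"
      guesses ++ [choice]) []

-- ===== PORT B =====
def make_guesses_alt (hats : List String) : List String :=
  let total : Int := hats.foldl (fun t h => t + (if h == "W" then 1 else 0)) 0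
  hats.map (fun h =>
    if PySem.Int.mod (total - (if h == "W" then 1 else 0)) 2 == 0 then "B" else "W")

-- ===== PRECONDITION & SPEC =====
def Spec_make_guesses (hats : List String) (out : List String) : Prop := out = make_guesses_alt hats
instance (hats : List String) (out : List String) : Decidable (Spec_make_guesses hats out) := by unfold Spec_make_guesses; infer_instance

-- ===== CLAIM (what is proved, stated in full; the proofs are below) =====
def Claim_equal_make_guesses : Prop := ∀ (hats : List String), Dom_make_guesses hats → Spec_make_guesses hats (make_guesses hats)

-- ===== LEMMAS AND PROOFS =====

def whiteVal (h : String) : Int := if h == "W" then 1 else 0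

theorem cw_eq_sum (hats : List String) :
    count_white_hats hats = (hats.map whiteVal).sum := by
  unfold count_white_hats
  rw [PySem.List.foldl_add (g := fun h => if h == "W" then (1:Int) else 0)]
  unfold whiteVal; simp

theorem total_split (hats : List String) (k : Nat) (hk : k < hats.length) :
    (hats.map whiteVal).sum =
      ((hats.take k).map whiteVal).sum + whiteVal hats[k] + ((hats.drop (k+1)).map whiteVal).sum := by
  conv_lhs => rw [← List.take_append_drop k hats, List.drop_eq_getElem_cons hk]
  rw [List.map_append, List.sum_append, List.map_cons, List.sum_cons]
  ring

theorem make_guesses_spec : Claim_equal_make_guesses := by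
  intro hats _
  unfold Spec_make_guesses make_guesses make_guesses_alt
  rw [PySem.List.foldl_append_singleton_eq_map]
  simp only [List.nil_append]
  set total : Int := hats.foldl (fun t h => t + (if h == "W" then 1 else 0)) 0 with htotal
  have htot : total = (hats.map whiteVal).sum := by
    rw [htotal, PySem.List.foldl_add (g := fun h => if h == "W" then (1:Int) else 0)]
    unfold whiteVal; simp
  rw [PySem.List.pyRange_one, PySem.List.len_eq]
  simp only [Int.sub_zero, Int.toNat_natCast, List.map_map]
  apply List.ext_getElem
  · simp
  · intro k h1 h2
    simp only [List.getElem_map, List.getElem_range, Function.comp_apply]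
    have hk : k < hats.length := by simpa using h1
    have hz : (0:Int) + (k:Int) = ((k:Nat):Int) := by omega
    rw [hz]
    have hs1 : PySem.List.slice hats (some 0) (some ((k:Nat):Int)) = hats.take k := by
      rw [PySem.List.slice_zero_start, PySem.List.slice_to_natCast]
    have hs2 : PySem.List.slice hats (some (((k:Nat):Int) + 1)) (some ((hats.length : Nat) : Int)) = hats.drop (k+1) := by
      have : ((k:Nat):Int) + 1 = (((k+1:Nat)):Int) := by push_cast; ring
      rw [this, PySem.List.slice_natCast]
      exact List.take_of_length_le (by simp)
    rw [hs1, hs2, cw_eq_sum]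
    have hsum : ((hats.take k ++ hats.drop (k+1)).map whiteVal).sum
        = total - whiteVal hats[k] := by
      rw [htot, total_split hats k hk]
      simp [List.sum_append]
      ring
    rw [List.map_append] at hsum
    rw [List.map_append, hsum]
    have : whiteVal hats[k] = (if hats[k] == "W" then (1:Int) else 0) := rfl
    rw [this]
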